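-- pv_equiv track=rewrite | github.com/stdiohero/WordSegmentation | Segmentation.py | full_segmentation
-- ===== SOURCE A (Python) =====
-- def full_segmentation(sentence, dictionary, max_width = 12):
--     #全切分策咯，句子长度为N，构建[0, N+1]的序列，利用数对(i, j)表示切分的词语sentence[i:j]
--     #返回的seg_pool是按照字典序排序的
--     seg_relation = dict()
--     seg_pool = []
--     k = 0
--     maxN = len(sentence)
--     while k < maxN:
--         seg_relation[k] = []
--         end = min(k +max_width, maxN)
--         while end > k:
--             cur_word = sentence[k:end]
--             if cur_word in dictionary or end - k == 1:
--                 seg_relation[k].append(end)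
--                 seg_pool.append((k, end))
--             end -= 1
--         k += 1
--     return seg_relation
-- ===== SOURCE B (Python) =====
-- def full_segmentation(sentence, dictionary, max_width=12):
--     # Dictionary-driven: precompute all occurrence spans of dictionary words once,
--     # then emit each position's ends from the window by set membership.
--     n = len(sentence)
--     match = set()
--     for w in dictionary:
--         m = len(w)
--         for i in range(n - m + 1):
--             if sentence[i:i+m] == w:
--                 match.add((i, i + m))
--     return {k: [e for e in range(min(k + max_width, n), k, -1)
--                 if e == k + 1 or (k, e) in match]
--             for k in range(n)}
-- ===== Notes on version B (the rewrite author's own statement) =====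
-- stated objective: alternative
-- what changed: A scans every window per position and tests it by linear list membership in the dictionary; B inverts the loops: it precomputes the set of all occurrence spans of each dictionary word once, then builds each position's end-list by constant-time set membership over the window.
import Mathlib
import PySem

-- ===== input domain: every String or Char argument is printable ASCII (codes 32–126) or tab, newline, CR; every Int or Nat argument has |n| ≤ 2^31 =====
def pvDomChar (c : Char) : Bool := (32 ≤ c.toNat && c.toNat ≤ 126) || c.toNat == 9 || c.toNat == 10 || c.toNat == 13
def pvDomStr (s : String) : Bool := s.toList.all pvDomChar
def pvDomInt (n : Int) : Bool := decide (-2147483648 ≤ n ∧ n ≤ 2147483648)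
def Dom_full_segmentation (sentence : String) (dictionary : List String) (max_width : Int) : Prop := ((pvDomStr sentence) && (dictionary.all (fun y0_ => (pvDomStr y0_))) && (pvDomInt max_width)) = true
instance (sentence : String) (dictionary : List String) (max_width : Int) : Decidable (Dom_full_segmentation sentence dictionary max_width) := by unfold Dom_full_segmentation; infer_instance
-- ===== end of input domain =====

-- B replaces A's per-window dictionary-list scans by one precomputed set of occurrence spans (alternative decomposition, same results).
-- ===== PORT A =====
-- inner 'while end > k' loop of A (seg_pool is built by A but never returned; it is omitted as dead code)
def fsA_inner (s : List Char) (dict : List String) (k : Int) (e : Int) : List Int :=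
  if h : k < e then
    (if dict.contains (String.ofList (PySem.List.slice s (some k) (some e))) || (e - k == 1) then
      e :: fsA_inner s dict k (e - 1)
    else fsA_inner s dict k (e - 1))
  else []
termination_by (e - k).toNat
decreasing_by all_goals omega

-- outer 'while k < maxN' loop of A, building seg_relation in insertion order
def fsA_outer (s : List Char) (dict : List String) (max_width maxN k : Int)
    (acc : List (Int × List Int)) : List (Int × List Int) :=
  if _h : k < maxN then
    fsA_outer s dict max_width maxN (k + 1)
      (acc ++ [(k, fsA_inner s dict k (min (k + max_width) maxN))])
  else acc
termination_by (maxN - k).toNat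
decreasing_by omega

def full_segmentation (sentence : String) (dictionary : List String) (max_width : Int) : List (Int × List Int) :=
  fsA_outer sentence.toList dictionary max_width (sentence.toList.length : Int) 0 []

-- ===== PORT B =====
-- 'match': the set of all spans (i, i+len(w)) at which some dictionary word w occurs
def fsB_match (s : List Char) (dict : List String) : PySem.Set (Int × Int) :=
  dict.foldl (fun acc w =>
    (PySem.List.pyRange 0 ((s.length : Int) - (w.toList.length : Int) + 1) 1).foldl
      (fun a i =>
        if PySem.List.slice s (some i) (some (i + (w.toList.length : Int))) = w.toList then
          PySem.Set.add a (i, i + (w.toList.length : Int))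
        else a)
      acc)
    PySem.Set.empty

def full_segmentation_alt (sentence : String) (dictionary : List String) (max_width : Int) : List (Int × List Int) :=
  let s := sentence.toList
  let n : Int := (s.length : Int)
  let mtch := fsB_match s dictionary
  (PySem.List.pyRange 0 n 1).map (fun k =>
    (k, (PySem.List.pyRange (min (k + max_width) n) k (-1)).filter
          (fun e => e == k + 1 || PySem.Set.contains mtch (k, e))))

-- ===== PRECONDITION & SPEC =====
def Spec_full_segmentation (sentence : String) (dictionary : List String) (max_width : Int) (out : List (Int × List Int)) : Prop := out = full_segmentation_alt sentence dictionary max_width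
instance (sentence : String) (dictionary : List String) (max_width : Int) (out : List (Int × List Int)) : Decidable (Spec_full_segmentation sentence dictionary max_width out) := by unfold Spec_full_segmentation; infer_instance

-- ===== CLAIM (what is proved, stated in full; the proofs are below) =====
def Claim_equal_full_segmentation : Prop := ∀ (sentence : String) (dictionary : List String) (max_width : Int), Dom_full_segmentation sentence dictionary max_width → Spec_full_segmentation sentence dictionary max_width (full_segmentation sentence dictionary max_width)

-- ===== LEMMAS AND PROOFS =====

-- membership in the occurrence fold of one word
theorem mem_inner_fold (s : List Char) (w : String) (l : List Int)
    (acc : PySem.Set (Int × Int)) (x : Int × Int) :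
    (x ∈ l.foldl (fun a i =>
        if PySem.List.slice s (some i) (some (i + (w.toList.length : Int))) = w.toList then
          PySem.Set.add a (i, i + (w.toList.length : Int))
        else a) acc) ↔
      x ∈ acc ∨ ∃ i ∈ l, PySem.List.slice s (some i) (some (i + (w.toList.length : Int))) = w.toList ∧
        x = (i, i + (w.toList.length : Int)) := by
  induction l generalizing acc with
  | nil => simp
  | cons i t ih =>
    rw [List.foldl_cons]
    by_cases hp : PySem.List.slice s (some i) (some (i + (w.toList.length : Int))) = w.toList
    · rw [if_pos hp, ih]
      simp only [PySem.Set.mem_add, List.mem_cons]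
      constructor
      · rintro ((h | rfl) | ⟨j, hj, hs, rfl⟩)
        · exact Or.inl h
        · exact Or.inr ⟨i, Or.inl rfl, hp, rfl⟩
        · exact Or.inr ⟨j, Or.inr hj, hs, rfl⟩
      · rintro (h | ⟨j, (rfl | hj), hs, rfl⟩)
        · exact Or.inl (Or.inl h)
        · exact Or.inl (Or.inr rfl)
        · exact Or.inr ⟨j, hj, hs, rfl⟩
    · rw [if_neg hp, ih]
      simp only [List.mem_cons]
      constructor
      · rintro (h | ⟨j, hj, hs, rfl⟩)
        · exact Or.inl h
        · exact Or.inr ⟨j, Or.inr hj, hs, rfl⟩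
      · rintro (h | ⟨j, (rfl | hj), hs, rfl⟩)
        · exact Or.inl h
        · exact absurd hs hp
        · exact Or.inr ⟨j, hj, hs, rfl⟩

-- characterisation of fsB_match
theorem mem_fsB_match (s : List Char) (dict : List String) (p : Int × Int) :
    p ∈ fsB_match s dict ↔
      ∃ w ∈ dict, 0 ≤ p.1 ∧ p.1 + (w.toList.length : Int) ≤ (s.length : Int) ∧
        p.2 = p.1 + (w.toList.length : Int) ∧
        PySem.List.slice s (some p.1) (some p.2) = w.toList := by
  unfold fsB_match
  have gen : ∀ (ws : List String) (acc : PySem.Set (Int × Int)),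
      (p ∈ ws.foldl (fun acc w =>
        (PySem.List.pyRange 0 ((s.length : Int) - (w.toList.length : Int) + 1) 1).foldl
          (fun a i =>
            if PySem.List.slice s (some i) (some (i + (w.toList.length : Int))) = w.toList then
              PySem.Set.add a (i, i + (w.toList.length : Int))
            else a) acc) acc) ↔
        p ∈ acc ∨ ∃ w ∈ ws, 0 ≤ p.1 ∧ p.1 + (w.toList.length : Int) ≤ (s.length : Int) ∧
          p.2 = p.1 + (w.toList.length : Int) ∧
          PySem.List.slice s (some p.1) (some p.2) = w.toList := by
    intro ws
    induction ws with
    | nil => simp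
    | cons w t ih =>
      intro acc
      simp only [List.foldl_cons, ih, List.mem_cons, mem_inner_fold]
      constructor
      · rintro ((h | ⟨i, hi, hsl, rfl⟩) | ⟨v, hv, h⟩)
        · exact Or.inl h
        · refine Or.inr ⟨w, Or.inl rfl, ?_, ?_, rfl, hsl⟩ <;>
            · have := PySem.List.mem_pyRange_one.1 hi; omega
        · exact Or.inr ⟨v, Or.inr hv, h⟩
      · rintro (h | ⟨v, (rfl | hv), h0, hle, he, hsl⟩)
        · exact Or.inl (Or.inl h)
        · refine Or.inl (Or.inr ⟨p.1, PySem.List.mem_pyRange_one.2 ⟨h0, by omega⟩, ?_, ?_⟩)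
          · rw [← he]; exact hsl
          · exact Prod.ext rfl he
        · exact Or.inr ⟨v, hv, h0, hle, he, hsl⟩
  rw [gen]
  simp

theorem slice_length_of_bounds (s : List Char) (a b : Int) (h0 : 0 ≤ a) (hab : a ≤ b)
    (hb : b ≤ (s.length : Int)) :
    ((PySem.List.slice s (some a) (some b)).length : Int) = b - a := by
  rw [PySem.List.length_slice]
  simp only [PySem.List.clampIdx] at *
  split_ifs <;> omega

-- A's membership-or-singleton test equals B's span-set test, inside the window
theorem pred_eq (s : List Char) (dict : List String) (k e : Int)
    (h0 : 0 ≤ k) (hke : k < e) (hen : e ≤ (s.length : Int)) :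
    (dict.contains (String.ofList (PySem.List.slice s (some k) (some e))) || (e - k == 1)) =
      (e == k + 1 || PySem.Set.contains (fsB_match s dict) (k, e)) := by
  have hlen := slice_length_of_bounds s k e h0 (le_of_lt hke) hen
  have hcont : dict.contains (String.ofList (PySem.List.slice s (some k) (some e))) =
      PySem.Set.contains (fsB_match s dict) (k, e) := by
    apply Bool.coe_iff_coe.mp
    rw [List.contains_iff_mem]
    have hmem : PySem.Set.contains (fsB_match s dict) (k, e) = true ↔ (k, e) ∈ fsB_match s dict := by
      simp [PySem.Set.contains]
    rw [hmem, mem_fsB_match]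
    constructor
    · intro hA
      refine ⟨String.ofList (PySem.List.slice s (some k) (some e)), hA, h0, ?_, ?_, ?_⟩
      · rw [String.toList_ofList]; omega
      · rw [String.toList_ofList]; omega
      · rw [String.toList_ofList]
    · rintro ⟨w, hw, -, -, he, hsl⟩
      have : String.ofList (PySem.List.slice s (some k) (some e)) = w := by
        rw [hsl, String.ofList_toList]
      exact this ▸ hw
  rw [hcont]
  have h1 : (e - k == 1) = (e == k + 1) := by
    apply Bool.coe_iff_coe.mp
    simp only [beq_iff_eq]
    omega
  rw [h1, Bool.or_comm]

-- the inner loop is the filtered countdown range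
theorem fsA_inner_eq (s : List Char) (dict : List String) (k : Int) (e : Int)
    (h0 : 0 ≤ k) (hen : e ≤ (s.length : Int)) :
    fsA_inner s dict k e =
      (PySem.List.pyRange e k (-1)).filter
        (fun x => x == k + 1 || PySem.Set.contains (fsB_match s dict) (k, x)) := by
  by_cases h : k < e
  · rw [fsA_inner, dif_pos h, PySem.List.pyRange_neg_one_cons h, List.filter_cons,
      fsA_inner_eq s dict k (e - 1) h0 (by omega), ← pred_eq s dict k e h0 h hen]
  · rw [fsA_inner, dif_neg h, PySem.List.pyRange_neg_one_eq_nil (by omega)]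
    simp
termination_by (e - k).toNat
decreasing_by omega

-- the outer loop is the mapped range
theorem fsA_outer_eq (s : List Char) (dict : List String) (mw n k : Int)
    (acc : List (Int × List Int)) :
    fsA_outer s dict mw n k acc =
      acc ++ (PySem.List.pyRange k n 1).map
        (fun k => (k, fsA_inner s dict k (min (k + mw) n))) := by
  by_cases h : k < n
  · rw [fsA_outer, dif_pos h, fsA_outer_eq, PySem.List.pyRange_one_cons h]
    simp
  · rw [fsA_outer, dif_neg h, PySem.List.pyRange_one_eq_nil (by omega)]
    simp
termination_by (n - k).toNat
decreasing_by omega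

-- ===== VERDICT (by name: the statement is the Claim_ definition above) =====
theorem full_segmentation_spec : Claim_equal_full_segmentation := by
  intro sentence dictionary max_width _
  unfold Spec_full_segmentation full_segmentation full_segmentation_alt
  rw [fsA_outer_eq]
  simp only [List.nil_append]
  apply List.map_congr_left
  intro k hk
  have hk' := PySem.List.mem_pyRange_one.1 hk
  rw [fsA_inner_eq sentence.toList dictionary k _ hk'.1 (by omega)]
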